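-- pv_equiv track=rewrite | github.com/dkyng11-25/Fast-Fish | backup-boris-code/ProducMixClustering_spu_clustering_rules_visualization-copy-spu-enhanced-pipeline-august-2025/src/step17_enhanced_trending.py | get_stores_in_group
-- ===== SOURCE A (Python) =====
-- from typing import Dict, List, Optional, Tuple
--
-- def get_stores_in_group(store_group_name: str) -> List[str]:
--     """Get list of store codes that belong to a specific store group."""
--
--     # Extract group number from name like "Store Group 15"
--     try:
--         group_number = int(store_group_name.split()[-1])
--     except:
--         group_number = 1
--
--     # Generate store codes that would map to this group (reverse engineering)
--     stores = []
--     for i in range(1000, 9999):  # Typical store code range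
--         store_code = str(i)
--         calculated_group = ((int(store_code[-3:]) if store_code[-3:].isdigit() else hash(store_code)) % 46) + 1
--         if calculated_group == group_number:
--             stores.append(store_code)
--         if len(stores) >= 100:  # Limit to reasonable number
--             break
--
--     return stores[:50]  # Return reasonable subset
-- ===== SOURCE B (Python) =====
-- def get_stores_in_group(store_group_name: str) -> list:
--     """Get list of store codes that belong to a specific store group."""
--     try:
--         group_number = int(store_group_name.split()[-1])
--     except:
--         group_number = 1
--     r = group_number - 1
--     if not (0 <= r <= 45):
--         return []
--     # Directly generate the qualifying codes in ascending order instead of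
--     # scanning every integer in 1000..9998 and testing it.
--     stores = []
--     for prefix in range(1, 10):
--         suffix = r
--         while suffix <= 999:
--             stores.append(str(prefix * 1000 + suffix))
--             if len(stores) == 50:
--                 return stores
--             suffix += 46
--     return stores
-- ===== Notes on version B (the rewrite author's own statement) =====
-- stated objective: alternative
-- what changed: B computes the residue r = group_number - 1 and directly generates the qualifying codes as prefix*1000 + suffix for suffix stepping through r, r+46, ... <= 999 and prefix 1..9 until 50 are collected (returning [] when r is outside 0..45), instead of A's scan over every integer 1000..9998 testing each code's last three digits.
import Mathlib
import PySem

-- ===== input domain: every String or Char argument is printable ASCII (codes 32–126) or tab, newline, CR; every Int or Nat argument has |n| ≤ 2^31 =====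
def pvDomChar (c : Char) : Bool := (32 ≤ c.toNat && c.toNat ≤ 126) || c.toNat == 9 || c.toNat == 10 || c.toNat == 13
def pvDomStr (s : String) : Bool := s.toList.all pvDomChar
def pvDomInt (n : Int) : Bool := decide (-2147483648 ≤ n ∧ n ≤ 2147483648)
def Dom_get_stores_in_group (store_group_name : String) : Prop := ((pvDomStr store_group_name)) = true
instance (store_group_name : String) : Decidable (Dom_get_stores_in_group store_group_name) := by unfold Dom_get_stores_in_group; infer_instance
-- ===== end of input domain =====

-- B generates the qualifying store codes directly from the residue class (prefix 1..9 ×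
-- ascending arithmetic progression of suffixes) instead of scanning and testing every
-- integer in 1000..9998; objective: alternative (direct generation, same bounded cost).


-- shared by both Pythons verbatim:  try: group_number = int(store_group_name.split()[-1])  except: group_number = 1
def pvParseGroup (store_group_name : String) : Int :=
  match PySem.List.pyGet? (PySem.Str.split₀ store_group_name) (-1) with
  | none => 1                          -- IndexError on split() == [] → except: group_number = 1
  | some tok =>
      match PySem.Int.ofStr? tok with
      | none => 1                      -- ValueError from int() → except: group_number = 1
      | some v => v

-- ===== PORT A =====
-- the line  calculated_group = ((int(store_code[-3:]) if store_code[-3:].isdigit() else hash(store_code)) % 46) + 1 .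
-- The hash() branch is unreachable (str(i) for i in range(1000, 9999) is all digits, so
-- isdigit() is always true); it is ported as 0.  int() cannot raise under the isdigit
-- guard, so the getD 0 default is likewise never taken; both are exact on the loop's inputs.
def pvCalcA (i : Int) : Int :=
  let store_code := PySem.Int.toStr i
  let last3 := PySem.Str.slice store_code (some (-3)) none
  PySem.Int.mod (if PySem.Str.strIsdigit last3 then (PySem.Int.ofStr? last3).getD 0 else 0) 46 + 1

-- the loop  'for i in range(1000, 9999): … if len(stores) >= 100: break'
def pvLoopA (group_number : Int) : List Int → List String → List String
  | [], stores => stores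
  | i :: rest, stores =>
      let store_code := PySem.Int.toStr i
      let stores' := if pvCalcA i == group_number then stores ++ [store_code] else stores
      if 100 ≤ PySem.List.len stores' then stores' else pvLoopA group_number rest stores'

def get_stores_in_group (store_group_name : String) : List String :=
  let group_number := pvParseGroup store_group_name
  let stores := pvLoopA group_number (PySem.List.pyRange 1000 9999 1) []
  PySem.List.slice stores none (some 50)        -- stores[:50]

-- ===== PORT B =====
-- inner 'while suffix <= 999' loop; the Bool is true when the early 'return stores' fired
def pvSuffixLoop (pfx : Int) (suffix : Int) (stores : List String) : List String × Bool :=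
  if _h : suffix ≤ 999 then
    let stores' := stores ++ [PySem.Int.toStr (pfx * 1000 + suffix)]
    if PySem.List.len stores' = 50 then (stores', true)
    else pvSuffixLoop pfx (suffix + 46) stores'
  else (stores, false)
  termination_by (1000 - suffix).toNat
  decreasing_by omega

-- outer 'for prefix in range(1, 10)' loop
def pvLoopB (r : Int) : List Int → List String → List String
  | [], stores => stores
  | p :: rest, stores =>
      match pvSuffixLoop p r stores with
      | (stores', true) => stores'
      | (stores', false) => pvLoopB r rest stores'

def get_stores_in_group_alt (store_group_name : String) : List String :=
  let group_number := pvParseGroup store_group_name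
  let r := group_number - 1
  if 0 ≤ r ∧ r ≤ 45 then pvLoopB r (PySem.List.pyRange 1 10 1) []
  else []

-- ===== PRECONDITION & SPEC =====
def Spec_get_stores_in_group (store_group_name : String) (out : List String) : Prop := out = get_stores_in_group_alt store_group_name
instance (store_group_name : String) (out : List String) : Decidable (Spec_get_stores_in_group store_group_name out) := by unfold Spec_get_stores_in_group; infer_instance

-- ===== CLAIM (what is proved, stated in full; the proofs are below) =====
def Claim_equal_get_stores_in_group : Prop := ∀ (store_group_name : String), Dom_get_stores_in_group store_group_name → Spec_get_stores_in_group store_group_name (get_stores_in_group store_group_name)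

-- ===== LEMMAS AND PROOFS =====

-- the three-digit zero-padded decimal representation of b < 1000
def pad3 (b : Nat) : List Char :=
  [Nat.digitChar (b / 100), Nat.digitChar (b / 10 % 10), Nat.digitChar (b % 10)]

-- the suffixes s, s+46, s+92, … that are ≤ 999 (the values B's while-loop walks through);
-- written with structural fuel so that the kernel can evaluate it
def sufListAux : Nat → Int → List Int
  | 0, _ => []
  | f + 1, s => if s ≤ 999 then s :: sufListAux f (s + 46) else []

def sufList (s : Int) : List Int := sufListAux (1000 - s).toNat s

theorem sufListAux_congr : ∀ (f1 f2 : Nat) (s : Int), (1000 - s).toNat ≤ f1 → (1000 - s).toNat ≤ f2 →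
    sufListAux f1 s = sufListAux f2 s := by
  intro f1
  induction f1 with
  | zero =>
      intro f2 s h1 h2
      cases f2 with
      | zero => rfl
      | succ f2 => rw [sufListAux, sufListAux, if_neg (by omega)]
  | succ f1 ih =>
      intro f2 s h1 h2
      cases f2 with
      | zero => rw [sufListAux, sufListAux, if_neg (by omega)]
      | succ f2 =>
          rw [sufListAux, sufListAux]
          by_cases hs : s ≤ 999
          · rw [if_pos hs, if_pos hs, ih f2 (s + 46) (by omega) (by omega)]
          · rw [if_neg hs, if_neg hs]

theorem sufList_cons (s : Int) (hs : s ≤ 999) : sufList s = s :: sufList (s + 46) := by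
  obtain ⟨k, hk⟩ : ∃ k, (1000 - s).toNat = k + 1 := ⟨(1000 - s).toNat - 1, by omega⟩
  rw [sufList, hk, sufListAux, if_pos hs, sufList,
      sufListAux_congr k (1000 - (s + 46)).toNat (s + 46) (by omega) (by omega)]

theorem sufList_nil (s : Int) (hs : 999 < s) : sufList s = [] := by
  rw [sufList]
  cases h : (1000 - s).toNat with
  | zero => rfl
  | succ k => rw [sufListAux, if_neg (by omega)]

-- math-style digits of a Nat, mirroring Nat.toDigitsCore's recursion
def pvDigits (n : Nat) : List Char :=
  if _h : n / 10 = 0 then [Nat.digitChar (n % 10)]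
  else pvDigits (n / 10) ++ [Nat.digitChar (n % 10)]
  termination_by n
  decreasing_by exact Nat.div_lt_self (by omega) (by omega)

-- one kernel computation: parsing a 3-digit string gives back its value, and the
-- suffix progression for each residue r < 46 is the filter of 0..999 and has ≥ 21 elements
set_option maxRecDepth 1000000 in
theorem pvMaster :
    (((List.range 1000).all fun b =>
        (PySem.Int.ofChars? (pad3 b) == some (b : Int)) && PySem.Chars.strIsdigit (pad3 b)) &&
     ((List.range 46).all fun r =>
        (((PySem.List.pyRange 0 1000 1).filter fun s => PySem.Int.mod s 46 == (r : Int)) == sufList (r : Int)) &&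
        decide (21 ≤ (sufList (r : Int)).length))) = true := by
  decide

theorem pad3_parse (b : Nat) (hb : b < 1000) :
    PySem.Int.ofChars? (pad3 b) = some (b : Int) ∧ PySem.Chars.strIsdigit (pad3 b) = true := by
  have h := (Bool.and_eq_true _ _).mp pvMaster |>.1
  have h2 := List.all_eq_true.mp h b (List.mem_range.mpr hb)
  have h3 := (Bool.and_eq_true _ _).mp h2
  exact ⟨beq_iff_eq.mp h3.1, h3.2⟩

theorem sufAP (r : Nat) (hr : r < 46) :
    ((PySem.List.pyRange 0 1000 1).filter fun s => PySem.Int.mod s 46 == (r : Int)) = sufList (r : Int) ∧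
    21 ≤ (sufList (r : Int)).length := by
  have h := (Bool.and_eq_true _ _).mp pvMaster |>.2
  have h2 := List.all_eq_true.mp h r (List.mem_range.mpr hr)
  have h3 := (Bool.and_eq_true _ _).mp h2
  exact ⟨beq_iff_eq.mp h3.1, of_decide_eq_true h3.2⟩

theorem tdc : ∀ (f n : Nat) (ds : List Char), n < f →
    Nat.toDigitsCore 10 f n ds = pvDigits n ++ ds := by
  intro f
  induction f with
  | zero => omega
  | succ f ih =>
      intro n ds h
      rw [Nat.toDigitsCore]
      by_cases h0 : n / 10 = 0
      · rw [if_pos h0]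
        conv_rhs => rw [pvDigits, dif_pos h0]
        rfl
      · rw [if_neg h0, ih (n / 10) _ (by omega)]
        conv_rhs => rw [pvDigits, dif_neg h0]
        rw [List.append_assoc]
        rfl

theorem toDigits4 (n : Nat) (h1 : 1000 ≤ n) (h2 : n < 10000) :
    Nat.toDigits 10 n = Nat.digitChar (n / 1000) :: pad3 (n % 1000) := by
  have e : Nat.toDigits 10 n = pvDigits n := by
    rw [Nat.toDigits, tdc (n + 1) n [] (by omega), List.append_nil]
  have u1 : pvDigits n = pvDigits (n / 10) ++ [Nat.digitChar (n % 10)] := by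
    rw [pvDigits, dif_neg (by omega)]
  have u2 : pvDigits (n / 10) = pvDigits (n / 100) ++ [Nat.digitChar (n / 10 % 10)] := by
    rw [pvDigits, dif_neg (by omega)]
    congr 2
    omega
  have u3 : pvDigits (n / 100) = pvDigits (n / 1000) ++ [Nat.digitChar (n / 100 % 10)] := by
    rw [pvDigits, dif_neg (by omega)]
    congr 2
    omega
  have u4 : pvDigits (n / 1000) = [Nat.digitChar (n / 1000)] := by
    rw [pvDigits, dif_pos (by omega), Nat.mod_eq_of_lt (by omega : n / 1000 < 10)]
  rw [e, u1, u2, u3, u4]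
  have e2 : n / 100 % 10 = n % 1000 / 100 := by omega
  have e3 : n / 10 % 10 = n % 1000 / 10 % 10 := by omega
  have e4 : n % 10 = n % 1000 % 10 := by omega
  rw [e2, e3, e4]
  rfl

-- A's calculated_group for a four-digit i is (i mod 1000) mod 46 + 1
theorem calcA_eq (i : Int) (h1 : 1000 ≤ i) (h2 : i < 10000) :
    pvCalcA i = PySem.Int.mod ((i.toNat % 1000 : Nat) : Int) 46 + 1 := by
  have hn0 : ¬ i < 0 := by omega
  have hchars : (PySem.Int.toStr i).toList = Nat.digitChar (i.toNat / 1000) :: pad3 (i.toNat % 1000) := by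
    rw [PySem.Int.toList_toStr, PySem.Int.toChars, if_neg hn0,
        toDigits4 i.toNat (by omega) (by omega)]
  have hlen : (PySem.Int.toStr i).toList.length = 4 := by rw [hchars]; rfl
  have hslice : (PySem.Str.slice (PySem.Int.toStr i) (some (-3)) none).toList = pad3 (i.toNat % 1000) := by
    show (String.ofList (PySem.Chars.slice (PySem.Int.toStr i).toList (some (-3)) none)).toList = _
    rw [String.toList_ofList, PySem.Chars.slice_eq_listSlice,
        PySem.List.slice_from_neg_ofNat _ 3 (by omega), hlen, hchars]
    rfl
  have hp := pad3_parse (i.toNat % 1000) (by omega)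
  have hdig : PySem.Str.strIsdigit (PySem.Str.slice (PySem.Int.toStr i) (some (-3)) none) = true := by
    show PySem.Chars.strIsdigit (PySem.Str.slice (PySem.Int.toStr i) (some (-3)) none).toList = true
    rw [hslice]; exact hp.2
  have hof : PySem.Int.ofStr? (PySem.Str.slice (PySem.Int.toStr i) (some (-3)) none)
      = some ((i.toNat % 1000 : Nat) : Int) := by
    show PySem.Int.ofChars? (PySem.Str.slice (PySem.Int.toStr i) (some (-3)) none).toList = _
    rw [hslice]; exact hp.1
  simp only [pvCalcA, hdig, if_pos, hof]
  rfl

-- A's bounded collecting loop is "filter, map, take (remaining quota of 100)"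
theorem loopA_cap (g : Int) : ∀ (xs : List Int) (acc : List String), acc.length < 100 →
    pvLoopA g xs acc
      = acc ++ ((xs.filter fun i => pvCalcA i == g).map PySem.Int.toStr).take (100 - acc.length) := by
  intro xs
  induction xs with
  | nil => intro acc h; simp [pvLoopA]
  | cons i rest ih =>
      intro acc h
      rw [pvLoopA, List.filter_cons]
      by_cases hc : (pvCalcA i == g) = true
      · rw [if_pos hc, if_pos hc, List.map_cons]
        by_cases hfull : (100 : Int) ≤ PySem.List.len (acc ++ [PySem.Int.toStr i])
        · rw [if_pos hfull]
          simp only [PySem.List.len_eq, List.length_append, List.length_singleton] at hfull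
          have : 100 - acc.length = 1 := by
            have : (100 : Int) ≤ (acc.length : Int) + 1 := by exact_mod_cast hfull
            omega
          rw [this]
          simp
        · rw [if_neg hfull]
          simp only [PySem.List.len_eq, List.length_append, List.length_singleton] at hfull
          have hlt : acc.length + 1 < 100 := by
            have : ¬ (100 : Int) ≤ (acc.length : Int) + 1 := by exact_mod_cast hfull
            omega
          rw [ih (acc ++ [PySem.Int.toStr i]) (by simpa using hlt)]
          have e1 : 100 - acc.length = (100 - (acc ++ [PySem.Int.toStr i]).length) + 1 := by
            simp only [List.length_append, List.length_singleton]
            omega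
          rw [e1, List.take_succ_cons, List.append_assoc]
          rfl
      · rw [if_neg hc, if_neg hc]
        have hn : ¬ (100 : Int) ≤ PySem.List.len acc := by
          simp only [PySem.List.len_eq]
          exact_mod_cast (by omega : ¬ (100 : Int) ≤ (acc.length : Int))
        rw [if_neg hn, ih acc h]

-- B's inner while-loop is "map over the suffix progression, take (remaining quota of 50)";
-- the Bool says whether the quota was reached
theorem sufLoop_eq (p s : Int) (acc : List String) (h : acc.length < 50) :
    pvSuffixLoop p s acc
      = (acc ++ ((sufList s).map fun t => PySem.Int.toStr (p * 1000 + t)).take (50 - acc.length),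
         decide (50 ≤ acc.length + (sufList s).length)) := by
  rw [pvSuffixLoop]
  by_cases hs : s ≤ 999
  · rw [dif_pos hs, sufList_cons s hs]
    simp only [List.map_cons, List.length_cons]
    by_cases hfull : PySem.List.len (acc ++ [PySem.Int.toStr (p * 1000 + s)]) = 50
    · rw [if_pos hfull]
      simp only [PySem.List.len_eq, List.length_append, List.length_singleton] at hfull
      have hl : acc.length = 49 := by
        have : (acc.length : Int) + 1 = 50 := by exact_mod_cast hfull
        omega
      have h50 : 50 - acc.length = 1 := by omega
      rw [h50]
      have hflag : 50 ≤ acc.length + ((sufList (s + 46)).length + 1) := by omega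
      simp [hflag]
    · rw [if_neg hfull]
      simp only [PySem.List.len_eq, List.length_append, List.length_singleton] at hfull
      have hl : (acc ++ [PySem.Int.toStr (p * 1000 + s)]).length < 50 := by
        simp only [List.length_append, List.length_singleton]
        have : (acc.length : Int) + 1 ≠ 50 := by exact_mod_cast hfull
        omega
      rw [sufLoop_eq p (s + 46) _ hl]
      have e1 : (50 : Nat) - acc.length = (50 - (acc ++ [PySem.Int.toStr (p * 1000 + s)]).length) + 1 := by
        simp only [List.length_append, List.length_singleton]
        omega
      have e2 : decide (50 ≤ (acc ++ [PySem.Int.toStr (p * 1000 + s)]).length + (sufList (s + 46)).length)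
          = decide (50 ≤ acc.length + ((sufList (s + 46)).length + 1)) := by
        simp only [List.length_append, List.length_singleton]
        exact decide_eq_decide.mpr (by omega)
      rw [e1, List.take_succ_cons, List.append_assoc, e2]
      rfl
  · rw [dif_neg hs, sufList_nil s (by omega)]
    simp only [List.map_nil, List.take_nil, List.append_nil, List.length_nil, Nat.add_zero]
    have hnf : ¬ (50 ≤ acc.length) := by omega
    simp [hnf]
  termination_by (1000 - s).toNat
  decreasing_by omega

-- B's outer loop is "take 50 of the concatenation over the prefixes"
theorem loopB_eq (r : Int) : ∀ (ps : List Int) (acc : List String), acc.length < 50 →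
    pvLoopB r ps acc
      = acc ++ (ps.flatMap fun p => (sufList r).map fun t => PySem.Int.toStr (p * 1000 + t)).take (50 - acc.length) := by
  intro ps
  induction ps with
  | nil => intro acc h; simp [pvLoopB]
  | cons p rest ih =>
      intro acc h
      rw [pvLoopB, sufLoop_eq p r acc h, List.flatMap_cons]
      by_cases hfl : 50 ≤ acc.length + (sufList r).length
      · rw [decide_eq_true hfl]
        dsimp only
        rw [List.take_append_of_le_length (by simp only [List.length_map]; omega)]
      · rw [decide_eq_false (by omega)]
        dsimp only
        have hfull : (((sufList r).map fun t => PySem.Int.toStr (p * 1000 + t)).take (50 - acc.length))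
            = (sufList r).map fun t => PySem.Int.toStr (p * 1000 + t) :=
          List.take_of_length_le (by simp only [List.length_map]; omega)
        rw [hfull, ih _ (by simp only [List.length_append, List.length_map]; omega), List.take_append,
            hfull, List.append_assoc]
        simp only [List.length_append, List.length_map]
        rw [show (50 : Nat) - (acc.length + (sufList r).length) = 50 - acc.length - (sufList r).length from by omega]

-- generic: map/filter distribute over flatMap
theorem map_filter_flatMap {α β : Type} (f : α → β) (q : α → Bool) (g : Int → List α) :
    ∀ l : List Int, ((l.flatMap g).filter q).map f = l.flatMap fun x => ((g x).filter q).map f := by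
  intro l
  induction l with
  | nil => simp
  | cons x xs ih => simp [List.filter_append, List.map_append, ih]

-- shifting a unit-step range
theorem pyRange_shift (c : Int) : ∀ (a b : Int),
    PySem.List.pyRange (a + c) (b + c) 1 = (PySem.List.pyRange a b 1).map fun x => x + c := by
  intro a b
  by_cases hab : a < b
  · have h1 : PySem.List.pyRange a b 1 = a :: PySem.List.pyRange (a + 1) b 1 :=
      PySem.List.pyRange_one_cons hab
    rw [h1, List.map_cons, PySem.List.pyRange_one_cons (by omega), ← pyRange_shift c (a + 1) b]
    have h2 : a + 1 + c = a + c + 1 := by ring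
    rw [h2]
  · rw [PySem.List.pyRange_of_pos _ _ Int.one_pos, PySem.List.pyRange_of_pos _ _ Int.one_pos,
        if_neg (by omega), if_neg hab]
    rfl
  termination_by a b => (b - a).toNat
  decreasing_by omega

-- one thousand-block of A's scan equals one prefix-block of B's generation
theorem block_eq (g r : Int) (hg : g = r + 1) (hr0 : 0 ≤ r) (hr46 : r < 46)
    (p : Int) (hp1 : 1 ≤ p) (hp8 : p ≤ 8) :
    (((PySem.List.pyRange (1000 * p) (1000 * p + 1000) 1).filter fun i => pvCalcA i == g).map PySem.Int.toStr)
      = (sufList r).map fun t => PySem.Int.toStr (p * 1000 + t) := by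
  have hshift : PySem.List.pyRange (1000 * p) (1000 * p + 1000) 1
      = (PySem.List.pyRange 0 1000 1).map fun x => x + 1000 * p := by
    have h0 := pyRange_shift (1000 * p) 0 1000
    rw [zero_add, show (1000 : Int) + 1000 * p = 1000 * p + 1000 from by ring] at h0
    exact h0
  rw [hshift, List.filter_map, List.map_map]
  have hcongr : List.filter ((fun i => pvCalcA i == g) ∘ fun x => x + 1000 * p) (PySem.List.pyRange 0 1000 1)
      = List.filter (fun s => PySem.Int.mod s 46 == ((r.toNat : Nat) : Int)) (PySem.List.pyRange 0 1000 1) := by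
    apply List.filter_congr
    intro s hs
    have hs' := PySem.List.mem_pyRange_one.mp hs
    have hcalc := calcA_eq (s + 1000 * p) (by omega) (by omega)
    have htn : ((s + 1000 * p).toNat % 1000 : Nat) = s.toNat := by omega
    have hcast : ((s.toNat : Nat) : Int) = s := by omega
    have hr' : ((r.toNat : Nat) : Int) = r := by omega
    simp only [Function.comp_apply, hcalc, htn, hcast, hr']
    apply Bool.eq_iff_iff.mpr
    simp only [beq_iff_eq]
    omega
  rw [hcongr, (sufAP r.toNat (by omega)).1]
  have hr' : ((r.toNat : Nat) : Int) = r := by omega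
  rw [hr']
  apply List.map_congr_left
  intro t _
  exact congrArg PySem.Int.toStr (by ring)

set_option maxRecDepth 10000 in
theorem pyRange19 : PySem.List.pyRange 1 9 1 = [1, 2, 3, 4, 5, 6, 7, 8] := by decide

-- A's scan range 1000..8999 decomposes into the eight full thousand-blocks
theorem rangesplit :
    PySem.List.pyRange 1000 9000 1
      = (PySem.List.pyRange 1 9 1).flatMap fun p => PySem.List.pyRange (1000 * p) (1000 * p + 1000) 1 := by
  rw [pyRange19]
  simp only [List.flatMap_cons, List.flatMap_nil, List.append_nil]
  norm_num
  rw [PySem.List.pyRange_one_append 1000 2000 9000 (by norm_num) (by norm_num),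
      PySem.List.pyRange_one_append 2000 3000 9000 (by norm_num) (by norm_num),
      PySem.List.pyRange_one_append 3000 4000 9000 (by norm_num) (by norm_num),
      PySem.List.pyRange_one_append 4000 5000 9000 (by norm_num) (by norm_num),
      PySem.List.pyRange_one_append 5000 6000 9000 (by norm_num) (by norm_num),
      PySem.List.pyRange_one_append 6000 7000 9000 (by norm_num) (by norm_num),
      PySem.List.pyRange_one_append 7000 8000 9000 (by norm_num) (by norm_num)]

-- if group_number is outside 1..46, A's test never fires (the computed group is always in 1..46)
theorem pvLoopA_out (g : Int) (hg : g < 1 ∨ 46 < g) : ∀ xs : List Int, pvLoopA g xs [] = [] := by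
  intro xs
  induction xs with
  | nil => rfl
  | cons i rest ih =>
      rw [pvLoopA]
      have hne : (pvCalcA i == g) = false := by
        apply beq_eq_false_iff_ne.mpr
        simp only [pvCalcA]
        have h1 := PySem.Int.mod_nonneg (if PySem.Str.strIsdigit (PySem.Str.slice (PySem.Int.toStr i) (some (-3)) none) then (PySem.Int.ofStr? (PySem.Str.slice (PySem.Int.toStr i) (some (-3)) none)).getD 0 else 0) (b := 46) (by norm_num)
        have h2 := PySem.Int.mod_lt (if PySem.Str.strIsdigit (PySem.Str.slice (PySem.Int.toStr i) (some (-3)) none) then (PySem.Int.ofStr? (PySem.Str.slice (PySem.Int.toStr i) (some (-3)) none)).getD 0 else 0) (b := 46) (by norm_num)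
        omega
      rw [hne]
      simp only [Bool.false_eq_true, if_false]
      have hn : ¬ (100 : Int) ≤ PySem.List.len ([] : List String) := by
        simp [PySem.List.len_eq]
      rw [if_neg hn]
      exact ih

-- for each admissible group number the two loops produce the same 50 codes
theorem pvBody_in (g : Int) (h1 : 1 ≤ g) (h2 : g ≤ 46) :
    PySem.List.slice (pvLoopA g (PySem.List.pyRange 1000 9999 1) []) none (some 50)
      = pvLoopB (g - 1) (PySem.List.pyRange 1 10 1) [] := by
  set r := g - 1 with hr
  have hcommon : (((PySem.List.pyRange 1000 9000 1).filter fun i => pvCalcA i == g).map PySem.Int.toStr)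
      = (PySem.List.pyRange 1 9 1).flatMap fun p => (sufList r).map fun t => PySem.Int.toStr (p * 1000 + t) := by
    rw [rangesplit, map_filter_flatMap]
    rw [List.flatMap_def, List.flatMap_def]
    refine congrArg List.flatten (List.map_congr_left ?_)
    intro p hp
    have hp' := PySem.List.mem_pyRange_one.mp hp
    exact block_eq g r (by omega) (by omega) (by omega) p (by omega) (by omega)
  have hLlen := (sufAP r.toNat (by omega)).2
  have hr' : ((r.toNat : Nat) : Int) = r := by omega
  rw [hr'] at hLlen
  have hflatlen : 50 ≤ ((PySem.List.pyRange 1 9 1).flatMap fun p => (sufList r).map fun t => PySem.Int.toStr (p * 1000 + t)).length := by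
    rw [pyRange19]
    simp only [List.flatMap_cons, List.flatMap_nil, List.append_nil, List.length_append, List.length_map]
    omega
  -- A side
  rw [PySem.List.slice_to _ (by norm_num), loopA_cap g _ [] (by norm_num)]
  simp only [List.nil_append, List.length_nil, Nat.sub_zero]
  have h50 : ((50 : Int)).toNat = 50 := rfl
  rw [h50, List.take_take]
  norm_num
  rw [PySem.List.pyRange_one_append 1000 9000 9999 (by norm_num) (by norm_num),
      List.filter_append, List.map_append, hcommon,
      List.take_append_of_le_length hflatlen]
  -- B side
  rw [loopB_eq r (PySem.List.pyRange 1 10 1) [] (by norm_num)]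
  simp only [List.nil_append, List.length_nil, Nat.sub_zero]
  rw [PySem.List.pyRange_one_append 1 9 10 (by norm_num) (by norm_num), List.flatMap_append,
      List.take_append_of_le_length hflatlen]

theorem pvBody_eq (g : Int) :
    PySem.List.slice (pvLoopA g (PySem.List.pyRange 1000 9999 1) []) none (some 50)
      = (if 0 ≤ g - 1 ∧ g - 1 ≤ 45 then pvLoopB (g - 1) (PySem.List.pyRange 1 10 1) [] else []) := by
  by_cases h : 0 ≤ g - 1 ∧ g - 1 ≤ 45
  · rw [if_pos h]
    exact pvBody_in g (by omega) (by omega)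
  · rw [if_neg h, pvLoopA_out g (by omega)]
    rfl

-- ===== VERDICT (by name: the statement is the Claim_ definition above) =====
theorem get_stores_in_group_spec : Claim_equal_get_stores_in_group := by
  intro s _
  unfold Spec_get_stores_in_group get_stores_in_group get_stores_in_group_alt
  exact pvBody_eq (pvParseGroup s)
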